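-- pv_equiv track=rewrite | github.com/MeJokar/ztm | getMaxAdditionalDinersCount.py | getMaxAdditionalDinersCount1
-- ===== SOURCE A (Python) =====
-- def getMaxAdditionalDinersCount1(N, K, M, S):
--   # Write your code here
--   i = 0
--   empty_seats = 0
--   empty_seats_list = []
--   while i < N:
--     #if i != taken_seat and
--     seat_open = True
--     if i+1 in S:
--         seat_open = False
--     elif any(j+1 in S for j in range(max(1, i-K),i)) or any(j+1 in S for j in range(i+1,min(N+1, i+K+1))):
--         #for j in range(0,K+1):
--            # if (i+1+j in S) or (i+1-j) in S:
--         seat_open = False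
--              # break
--     if seat_open:
--       empty_seats +=1
--       empty_seats_list.append(i+1)
--       i += K+1
--     else:
--       i +=1
--   return empty_seats, empty_seats_list
-- ===== SOURCE B (Python) =====
-- def getMaxAdditionalDinersCount1(N, K, M, S):
--     # Mark all seats within K of an occupied seat once (difference array),
--     # then a single scan that jumps K+1 after each placement.
--     n = N if N > 0 else 0
--     diff = [0] * (n + 2)
--     for s in S:
--         if 1 <= s <= n:
--             diff[max(1, s - K)] += 1
--             if s + K + 1 <= n:
--                 diff[s + K + 1] -= 1
--     blocked = []
--     run = 0
--     for p in range(1, n + 1):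
--         run += diff[p]
--         blocked.append(run > 0)
--     count = 0
--     seats = []
--     p = 1
--     while p <= n:
--         if blocked[p - 1]:
--             p += 1
--         else:
--             count += 1
--             seats.append(p)
--             p += K + 1
--     return count, seats
-- ===== Notes on version B (the rewrite author's own statement) =====
-- stated objective: faster
-- what changed: Instead of re-testing, for every seat, a K-wide window of S-membership queries, B marks all seats within K of an occupied seat once with a difference array (one +1/-1 pair per occupied seat, then a prefix-sum pass) and then does a single jumping scan that places a diner and skips K+1 seats.
-- intended difference: On inputs where seat 1 is occupied, K >= 1, N >= 2 and no seat in [2, min(N+1,K+2)] is occupied, A wrongly places a diner on seat 2 (its backward scan range starts at max(1,i-K) and therefore never looks at seat 1), while B keeps the K seats after the occupied seat 1 free, which is the intended spacing rule. — e.g. on getMaxAdditionalDinersCount1(2, 1, 0, [1]): A returns (1, [2]), B returns (0, [])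
-- outside the precondition, e.g. on getMaxAdditionalDinersCount1(1, -1, 0, [1]): A returns (0, []), B does not finish within the time limit; on getMaxAdditionalDinersCount1(3, 1, 0, [4]): A returns (1, [1]), B returns (2, [1, 3])
import Mathlib
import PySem

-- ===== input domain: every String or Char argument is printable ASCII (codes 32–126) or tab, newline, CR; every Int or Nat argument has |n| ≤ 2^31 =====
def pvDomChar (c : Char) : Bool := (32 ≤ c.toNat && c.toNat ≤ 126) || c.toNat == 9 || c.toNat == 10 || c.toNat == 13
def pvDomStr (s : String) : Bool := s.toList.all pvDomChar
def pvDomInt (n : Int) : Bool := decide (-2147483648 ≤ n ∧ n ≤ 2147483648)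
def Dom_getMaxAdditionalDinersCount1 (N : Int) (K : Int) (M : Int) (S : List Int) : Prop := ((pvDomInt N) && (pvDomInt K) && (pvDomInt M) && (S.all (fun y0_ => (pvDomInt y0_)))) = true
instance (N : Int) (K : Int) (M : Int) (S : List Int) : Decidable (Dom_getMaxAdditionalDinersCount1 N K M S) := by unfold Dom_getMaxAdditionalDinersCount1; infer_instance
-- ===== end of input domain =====

-- B replaces A's per-seat K-wide membership scans by a difference array that marks every
-- seat within K of an occupied seat once, followed by a single jumping scan (objective: faster).

-- ===== PORT A =====
-- A's while loop; fuel N.toNat+1 suffices: i starts at 0 and grows by at least 1 per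
-- iteration whenever K ≥ 0 (for K < 0 the Python loop diverges unless it never finds an
-- open seat; those inputs are outside Pre_)
def pvALoop (N K : Int) (S : List Int) : Nat → Int → Int → List Int → Int × List Int
  | 0, _, c, acc => (c, acc)
  | fuel+1, i, c, acc =>
    if i < N then
      let seatOpen : Bool :=
        if S.contains (i+1) then false
        else if ((PySem.List.pyRange (max 1 (i-K)) i 1).any (fun j => S.contains (j+1)))
             || ((PySem.List.pyRange (i+1) (min (N+1) (i+K+1)) 1).any (fun j => S.contains (j+1))) then false
        else true
      if seatOpen then pvALoop N K S fuel (i+K+1) (c+1) (acc ++ [i+1])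
      else pvALoop N K S fuel (i+1) c acc
    else (c, acc)

def getMaxAdditionalDinersCount1 (N : Int) (K : Int) (M : Int) (S : List Int) : Int × List Int :=
  pvALoop N K S (N.toNat + 1) 0 0 []

-- ===== PORT B =====
-- one occupied seat s ∈ [1,n]: diff[max(1,s-K)] += 1; if s+K+1 ≤ n: diff[s+K+1] -= 1
-- (both indices are in range there, so getD/set are exact for the Python list accesses)
def pvBStep (n K : Int) (d : List Int) (s : Int) : List Int :=
  if 1 ≤ s ∧ s ≤ n then
    let d1 := d.set (max 1 (s-K)).toNat (d.getD (max 1 (s-K)).toNat 0 + 1)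
    if s + K + 1 ≤ n then d1.set (s+K+1).toNat (d1.getD (s+K+1).toNat 0 - 1) else d1
  else d

def pvBDiff (n K : Int) (S : List Int) : List Int :=
  S.foldl (pvBStep n K) (List.replicate (n+2).toNat 0)

-- running prefix sum over diff: blocked[p-1] = (diff[1]+…+diff[p] > 0)
def pvBBlocked (n : Int) (diff : List Int) : List Bool :=
  ((PySem.List.pyRange 1 (n+1) 1).foldl
    (fun (st : Int × List Bool) p =>
      (st.1 + diff.getD p.toNat 0, st.2 ++ [decide (0 < st.1 + diff.getD p.toNat 0)]))
    (0, [])).2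

-- the jumping scan (same fuel bound as A's loop)
def pvBLoop (n K : Int) (blocked : List Bool) : Nat → Int → Int → List Int → Int × List Int
  | 0, _, c, acc => (c, acc)
  | fuel+1, p, c, acc =>
    if p ≤ n then
      if blocked.getD (p-1).toNat false then pvBLoop n K blocked fuel (p+1) c acc
      else pvBLoop n K blocked fuel (p+K+1) (c+1) (acc ++ [p])
    else (c, acc)

def getMaxAdditionalDinersCount1_alt (N : Int) (K : Int) (M : Int) (S : List Int) : Int × List Int :=
  let n := if 0 < N then N else 0
  pvBLoop n K (pvBBlocked n (pvBDiff n K S)) (n.toNat + 1) 1 0 []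

-- ===== PRECONDITION & SPEC =====
-- Pre_ excludes K < 0, where A's loop diverges as soon as it finds an open seat (A returns
-- only on the thin slice where every seat test fails), and lists containing N+1, where A
-- blocks the last K seats because its forward scan treats the nonexistent seat N+1 as
-- occupied — an artefact of the min(N+1, i+K+1) bound.
def Pre_getMaxAdditionalDinersCount1 (N : Int) (K : Int) (M : Int) (S : List Int) : Prop :=
  0 ≤ K ∧ (N + 1) ∉ S
instance (N : Int) (K : Int) (M : Int) (S : List Int) : Decidable (Pre_getMaxAdditionalDinersCount1 N K M S) := by unfold Pre_getMaxAdditionalDinersCount1; infer_instance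
def pvWitness_getMaxAdditionalDinersCount1 : Int × Int × Int × List Int := (4, 1, 0, [2])

-- On inputs where seat 1 is occupied, K ≥ 1, N ≥ 2 and no seat in [2, min(N+1,K+2)] is
-- occupied, A places a diner on seat 2 (its backward scan starts at max(1,i-K) and so never
-- looks at seat 1), while B keeps the K seats after the occupied seat 1 free, which is the
-- intended spacing rule.
def D_getMaxAdditionalDinersCount1 (N : Int) (K : Int) (M : Int) (S : List Int) : Prop :=
  (1 : Int) ∈ S ∧ 1 ≤ K ∧ 2 ≤ N ∧ ∀ v ∈ S, ¬(2 ≤ v ∧ v ≤ min (N+1) (K+2))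
instance (N : Int) (K : Int) (M : Int) (S : List Int) : Decidable (D_getMaxAdditionalDinersCount1 N K M S) := by unfold D_getMaxAdditionalDinersCount1; infer_instance

def Spec_getMaxAdditionalDinersCount1 (N : Int) (K : Int) (M : Int) (S : List Int) (out : Int × List Int) : Prop := ¬ D_getMaxAdditionalDinersCount1 N K M S → out = getMaxAdditionalDinersCount1_alt N K M S
instance (N : Int) (K : Int) (M : Int) (S : List Int) (out : Int × List Int) : Decidable (Spec_getMaxAdditionalDinersCount1 N K M S out) := by unfold Spec_getMaxAdditionalDinersCount1; infer_instance

def pvDiffWitness_getMaxAdditionalDinersCount1 : Int × Int × Int × List Int := (2, 1, 0, [1])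
def pvDiffWitnessOut_getMaxAdditionalDinersCount1 : (Int × List Int) × (Int × List Int) := ((1, [2]), (0, []))

-- ===== CLAIM (what is proved, stated in full; the proofs are below) =====
def Claim_unchanged_getMaxAdditionalDinersCount1 : Prop := ∀ (N : Int) (K : Int) (M : Int) (S : List Int), Dom_getMaxAdditionalDinersCount1 N K M S → Pre_getMaxAdditionalDinersCount1 N K M S → Spec_getMaxAdditionalDinersCount1 N K M S (getMaxAdditionalDinersCount1 N K M S)
def Claim_changed_getMaxAdditionalDinersCount1 : Prop := Dom_getMaxAdditionalDinersCount1 (pvDiffWitness_getMaxAdditionalDinersCount1.1) (pvDiffWitness_getMaxAdditionalDinersCount1.2.1) (pvDiffWitness_getMaxAdditionalDinersCount1.2.2.1) (pvDiffWitness_getMaxAdditionalDinersCount1.2.2.2) ∧ Pre_getMaxAdditionalDinersCount1 (pvDiffWitness_getMaxAdditionalDinersCount1.1) (pvDiffWitness_getMaxAdditionalDinersCount1.2.1) (pvDiffWitness_getMaxAdditionalDinersCount1.2.2.1) (pvDiffWitness_getMaxAdditionalDinersCount1.2.2.2) ∧ D_getMaxAdditionalDinersCount1 (pvDiffWitness_getMaxAdditionalDinersCount1.1)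 (pvDiffWitness_getMaxAdditionalDinersCount1.2.1) (pvDiffWitness_getMaxAdditionalDinersCount1.2.2.1) (pvDiffWitness_getMaxAdditionalDinersCount1.2.2.2) ∧ getMaxAdditionalDinersCount1 (pvDiffWitness_getMaxAdditionalDinersCount1.1) (pvDiffWitness_getMaxAdditionalDinersCount1.2.1) (pvDiffWitness_getMaxAdditionalDinersCount1.2.2.1) (pvDiffWitness_getMaxAdditionalDinersCount1.2.2.2) = pvDiffWitnessOut_getMaxAdditionalDinersCount1.1 ∧ getMaxAdditionalDinersCount1_alt (pvDiffWitness_getMaxAdditionalDinersCount1.1) (pvDiffWitness_getMaxAdditionalDinersCount1.2.1) (pvDiffWitness_getMaxAdditionalDinersCount1.2.2.1) (pvDiffWitness_getMaxAdditionalDinersCount1.2.2.2) = pvDiffWitnessOut_getMaxAdditionalDinersCount1.2 ∧ pvDiffWitnessOut_getMaxAdditionalDinersCount1.1 ≠ pvDiffWitnessOut_getMaxAdditionalDinersCount1.2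
def Claim_exact_getMaxAdditionalDinersCount1 : Prop := ∀ (N : Int) (K : Int) (M : Int) (S : List Int), Dom_getMaxAdditionalDinersCount1 N K M S → Pre_getMaxAdditionalDinersCount1 N K M S → D_getMaxAdditionalDinersCount1 N K M S → getMaxAdditionalDinersCount1 N K M S ≠ getMaxAdditionalDinersCount1_alt N K M S

-- ===== LEMMAS AND PROOFS =====

-- the blocking notion both programs implement on Pre_ outside D_:
-- candidate seat p is blocked iff some occupied seat v ∈ [1,n] is within K of it
def pvBlk (n K : Int) (S : List Int) (p : Int) : Prop :=
  ∃ v ∈ S, 1 ≤ v ∧ v ≤ n ∧ p - K ≤ v ∧ v ≤ p + K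

-- sum of diff[1..p]
def pvPresum (d : List Int) (p : Nat) : Int :=
  ((List.range p).map (fun k => d.getD (k+1) 0)).sum

theorem pvPresum_succ (d : List Int) (p : Nat) :
    pvPresum d (p+1) = pvPresum d p + d.getD (p+1) 0 := by
  simp [pvPresum, List.range_succ]

theorem pvGetD_set (d : List Int) (i j : Nat) (x : Int) :
    (d.set i x).getD j 0 = if i = j ∧ i < d.length then x else d.getD j 0 := by
  by_cases hij : i = j
  · subst hij
    by_cases h : i < d.length
    · simp [List.getD_eq_getElem?_getD, List.getElem?_set_self h, h]
    · rw [List.set_eq_of_length_le (Nat.le_of_not_lt h)]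
      simp [h]
  · rw [List.getD_eq_getElem?_getD, List.getD_eq_getElem?_getD, List.getElem?_set_ne hij]
    simp [hij]

theorem pvPresum_set (d : List Int) (i : Nat) (x : Int) (p : Nat) :
    pvPresum (d.set i x) p
      = pvPresum d p + (if 1 ≤ i ∧ i ≤ p ∧ i < d.length then x - d.getD i 0 else 0) := by
  induction p with
  | zero =>
    have c : ¬(1 ≤ i ∧ i ≤ 0 ∧ i < d.length) := by omega
    rw [if_neg c, add_zero]
    rfl
  | succ p ih =>
    rw [pvPresum_succ, pvPresum_succ, ih, pvGetD_set]
    by_cases hip : i = p + 1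
    · by_cases hl : i < d.length
      · have c1 : i = p + 1 ∧ i < d.length := ⟨hip, hl⟩
        have c2 : ¬(1 ≤ i ∧ i ≤ p ∧ i < d.length) := by omega
        have c3 : 1 ≤ i ∧ i ≤ p + 1 ∧ i < d.length := ⟨by omega, by omega, hl⟩
        rw [if_pos c1, if_neg c2, if_pos c3, hip]; ring
      · have c1 : ¬(i = p + 1 ∧ i < d.length) := fun hc => hl hc.2
        have c2 : ¬(1 ≤ i ∧ i ≤ p ∧ i < d.length) := fun hc => hl hc.2.2
        have c3 : ¬(1 ≤ i ∧ i ≤ p + 1 ∧ i < d.length) := fun hc => hl hc.2.2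
        rw [if_neg c1, if_neg c2, if_neg c3]; ring
    · have c1 : ¬(i = p+1 ∧ i < d.length) := fun hc => hip hc.1
      rw [if_neg c1]
      by_cases c2 : 1 ≤ i ∧ i ≤ p ∧ i < d.length
      · have c3 : 1 ≤ i ∧ i ≤ p+1 ∧ i < d.length := ⟨c2.1, by omega, c2.2.2⟩
        rw [if_pos c2, if_pos c3]; ring
      · have c3 : ¬(1 ≤ i ∧ i ≤ p+1 ∧ i < d.length) := by
          intro hc; exact c2 ⟨hc.1, by omega, hc.2.2⟩
        rw [if_neg c2, if_neg c3]; ring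

theorem pvPresum_incr (d : List Int) (i : Nat) (δ : Int) (p : Nat) :
    pvPresum (d.set i (d.getD i 0 + δ)) p
      = pvPresum d p + (if 1 ≤ i ∧ i ≤ p ∧ i < d.length then δ else 0) := by
  rw [pvPresum_set]
  simp only [add_sub_cancel_left]

theorem pvBStep_length (n K : Int) (d : List Int) (s : Int) :
    (pvBStep n K d s).length = d.length := by
  unfold pvBStep
  split_ifs <;> simp

-- one occupied seat changes the prefix sum at p by exactly its blocking indicator
theorem pvBStep_presum (n K : Int) (d : List Int) (s : Int) (p : Nat)
    (hK : 0 ≤ K) (hp1 : 1 ≤ p) (hpn : (p : Int) ≤ n) (hd : d.length = (n+2).toNat) :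
    pvPresum (pvBStep n K d s) p
      = pvPresum d p
        + (if 1 ≤ s ∧ s ≤ n ∧ (p : Int) - K ≤ s ∧ s ≤ (p : Int) + K then 1 else 0) := by
  unfold pvBStep
  by_cases hs : 1 ≤ s ∧ s ≤ n
  · obtain ⟨hs1, hs2⟩ := hs
    rw [if_pos ⟨hs1, hs2⟩]
    have hlen : (d.length : Int) = n + 2 := by rw [hd]; omega
    have hmax1 : (1:Int) ≤ max 1 (s-K) := le_max_left _ _
    have hmax2 : s - K ≤ max 1 (s-K) := le_max_right _ _
    have hmax3 : max 1 (s-K) ≤ n := max_le (by omega) (by omega)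
    have hi1 : (((max 1 (s-K)).toNat : Int)) = max 1 (s-K) := Int.toNat_of_nonneg (by omega)
    have hC1 : (1 ≤ (max 1 (s-K)).toNat ∧ (max 1 (s-K)).toNat ≤ p ∧ (max 1 (s-K)).toNat < d.length)
        ↔ s ≤ (p : Int) + K := by
      constructor
      · intro hc; have := hc.2.1; omega
      · intro hc
        have hub : max 1 (s-K) ≤ (p : Int) := max_le (by omega) (by omega)
        refine ⟨by omega, by omega, by omega⟩
    by_cases hsn : s + K + 1 ≤ n
    · rw [if_pos hsn]
      have heq : ∀ d1 : List Int,
          d1.getD (s+K+1).toNat 0 - 1 = d1.getD (s+K+1).toNat 0 + (-1) := by intro d1; ring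
      rw [heq]
      rw [pvPresum_incr, pvPresum_incr]
      have hi2 : (((s+K+1).toNat : Int)) = s + K + 1 := Int.toNat_of_nonneg (by omega)
      have hlen1 : (d.set (max 1 (s-K)).toNat (d.getD (max 1 (s-K)).toNat 0 + 1)).length = d.length :=
        List.length_set
      rw [hlen1]
      have hC2 : (1 ≤ (s+K+1).toNat ∧ (s+K+1).toNat ≤ p ∧ (s+K+1).toNat < d.length)
          ↔ s + K + 1 ≤ (p : Int) := by omega
      rw [if_congr hC1 rfl rfl, if_congr hC2 rfl rfl]
      rw [add_assoc]
      congr 1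
      split_ifs <;> omega
    · rw [if_neg hsn]
      rw [pvPresum_incr]
      rw [if_congr hC1 rfl rfl]
      congr 1
      split_ifs <;> omega
  · rw [if_neg hs]
    have hc : ¬(1 ≤ s ∧ s ≤ n ∧ (p : Int) - K ≤ s ∧ s ≤ (p : Int) + K) := by
      intro hc; exact hs ⟨hc.1, hc.2.1⟩
    rw [if_neg hc, add_zero]

theorem pvBFold_presum (n K : Int) (p : Nat)
    (hK : 0 ≤ K) (hp1 : 1 ≤ p) (hpn : (p : Int) ≤ n) :
    ∀ (S : List Int) (d : List Int), d.length = (n+2).toNat →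
      pvPresum (S.foldl (pvBStep n K) d) p
        = pvPresum d p
          + ((S.countP (fun v => decide (1 ≤ v ∧ v ≤ n ∧ (p : Int) - K ≤ v ∧ v ≤ (p : Int) + K)) : Nat) : Int) := by
  intro S
  induction S with
  | nil => intro d _; simp
  | cons s S ih =>
    intro d hd
    rw [List.foldl_cons, ih _ (by rw [pvBStep_length]; exact hd),
        pvBStep_presum n K d s p hK hp1 hpn hd, List.countP_cons]
    by_cases hc : 1 ≤ s ∧ s ≤ n ∧ (p : Int) - K ≤ s ∧ s ≤ (p : Int) + K
    · rw [if_pos hc, decide_eq_true hc, if_pos rfl]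
      push_cast
      ring
    · rw [if_neg hc, decide_eq_false hc]
      norm_num

theorem pvPresum_replicate (m : Nat) (p : Nat) : pvPresum (List.replicate m (0:Int)) p = 0 := by
  refine List.sum_eq_zero ?_
  intro x hx
  rcases List.mem_map.mp hx with ⟨k, -, rfl⟩
  rw [List.getD_eq_getElem?_getD, List.getElem?_replicate]
  split <;> rfl

theorem pvPresum_pvBDiff (n K : Int) (S : List Int) (p : Nat)
    (hK : 0 ≤ K) (hp1 : 1 ≤ p) (hpn : (p : Int) ≤ n) :
    pvPresum (pvBDiff n K S) p
      = ((S.countP (fun v => decide (1 ≤ v ∧ v ≤ n ∧ (p : Int) - K ≤ v ∧ v ≤ (p : Int) + K)) : Nat) : Int) := by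
  unfold pvBDiff
  rw [pvBFold_presum n K p hK hp1 hpn S _ (by rw [List.length_replicate]),
      pvPresum_replicate, zero_add]

theorem pvBBlocked_fold (diff : List Int) : ∀ m : Nat,
    ((PySem.List.pyRange 1 ((m : Int)+1) 1).foldl
      (fun (st : Int × List Bool) p =>
        (st.1 + diff.getD p.toNat 0, st.2 ++ [decide (0 < st.1 + diff.getD p.toNat 0)]))
      (0, []))
    = (pvPresum diff m, (List.range m).map (fun k => decide (0 < pvPresum diff (k+1)))) := by
  intro m
  induction m with
  | zero =>
    have h0 : ((0:Nat):Int) + 1 = 1 := by norm_num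
    rw [h0, PySem.List.pyRange_one_eq_nil le_rfl]
    simp [pvPresum]
  | succ m ih =>
    have hb : (((m+1 : Nat)) : Int) + 1 = ((m : Int) + 1) + 1 := by push_cast; ring
    rw [hb, PySem.List.pyRange_one_succ_right (by omega), List.foldl_append, ih,
        List.foldl_cons, List.foldl_nil]
    dsimp only
    have ht : ((m : Int) + 1).toNat = m + 1 := by omega
    rw [ht]
    rw [show pvPresum diff m + diff.getD (m+1) 0 = pvPresum diff (m+1) from (pvPresum_succ diff m).symm]
    rw [List.range_succ, List.map_append]
    rfl

theorem pvBBlocked_getD (n K : Int) (S : List Int) (p : Int)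
    (hK : 0 ≤ K) (hp1 : 1 ≤ p) (hpn : p ≤ n) :
    ((pvBBlocked n (pvBDiff n K S)).getD (p-1).toNat false = true) ↔ pvBlk n K S p := by
  unfold pvBBlocked
  rw [show (n + 1 : Int) = ((n.toNat : Int)) + 1 by omega, pvBBlocked_fold]
  have hk : (p-1).toNat < n.toNat := by omega
  rw [List.getD_eq_getElem?_getD, List.getElem?_map, List.getElem?_range hk]
  simp only [Option.map_some, Option.getD_some]
  have hcast : (((p-1).toNat + 1 : Nat) : Int) = p := by omega
  rw [pvPresum_pvBDiff n K S ((p-1).toNat + 1) hK (by omega) (by omega)]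
  rw [decide_eq_true_eq]
  rw [Int.natCast_pos, List.countP_pos_iff]
  unfold pvBlk
  constructor
  · rintro ⟨v, hv, hvp⟩
    rw [decide_eq_true_eq] at hvp
    exact ⟨v, hv, hvp.1, hvp.2.1, by omega, by omega⟩
  · rintro ⟨v, hv, h1, h2, h3, h4⟩
    exact ⟨v, hv, by rw [decide_eq_true_eq]; exact ⟨h1, h2, by omega, by omega⟩⟩

-- A's open-seat test at i = p-1 agrees with pvBlk, under Pre_ and outside D_
theorem pvCond_equiv (N K : Int) (S : List Int) (i : Int)
    (hK : 0 ≤ K) (hNS : (N+1) ∉ S) (hD : ¬ D_getMaxAdditionalDinersCount1 N K 0 S)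
    (hi0 : 0 ≤ i) (hiN : i < N) :
    ((S.contains (i+1)
      || ((PySem.List.pyRange (max 1 (i-K)) i 1).any (fun j => S.contains (j+1)))
      || ((PySem.List.pyRange (i+1) (min (N+1) (i+K+1)) 1).any (fun j => S.contains (j+1)))) = true)
    ↔ pvBlk N K S (i+1) := by
  unfold D_getMaxAdditionalDinersCount1 at hD
  push_neg at hD
  simp only [Bool.or_eq_true, List.any_eq_true, PySem.List.mem_pyRange_one,
    List.contains_eq_mem, decide_eq_true_eq]
  unfold pvBlk
  constructor
  · rintro ((h | ⟨j, ⟨hj1, hj2⟩, hj3⟩) | ⟨j, ⟨hj1, hj2⟩, hj3⟩)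
    · exact ⟨i+1, h, by omega, by omega, by omega, by omega⟩
    · have hj1' : 1 ≤ j := le_trans (le_max_left _ _) hj1
      have hj1'' : i - K ≤ j := le_trans (le_max_right _ _) hj1
      exact ⟨j+1, hj3, by omega, by omega, by omega, by omega⟩
    · have hj2a : j < N + 1 := lt_of_lt_of_le hj2 (min_le_left _ _)
      have hj2b : j < i + K + 1 := lt_of_lt_of_le hj2 (min_le_right _ _)
      have hne : j + 1 ≠ N + 1 := fun hc => hNS (hc ▸ hj3)
      exact ⟨j+1, hj3, by omega, by omega, by omega, by omega⟩
  · rintro ⟨v, hvS, hv1, hvN, hvlo, hvhi⟩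
    rcases lt_trichotomy v (i+1) with hlt | heq | hgt
    · -- occupied seat strictly left of the candidate
      by_cases hv1' : v = 1
      · -- the clamped backward scan misses seat 1; ¬D_ supplies another blocker
        subst hv1'
        have hK1 : 1 ≤ K := by omega
        have hN2 : 2 ≤ N := by omega
        obtain ⟨w, hwS, hw2, hwmin⟩ := hD hvS hK1 hN2
        have hwN1 : w ≤ N + 1 := le_trans hwmin (min_le_left _ _)
        have hwK2 : w ≤ K + 2 := le_trans hwmin (min_le_right _ _)
        have hwN : w ≤ N := by
          rcases lt_or_eq_of_le hwN1 with h | h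
          · omega
          · exact absurd (h ▸ hwS) hNS
        rcases lt_trichotomy w (i+1) with hwlt | hweq | hwgt
        · refine Or.inl (Or.inr ⟨w-1, ⟨max_le_iff.mpr ⟨by omega, by omega⟩, by omega⟩, by
            rw [show w - 1 + 1 = w by ring]; exact hwS⟩)
        · exact Or.inl (Or.inl (hweq ▸ hwS))
        · refine Or.inr ⟨w-1, ⟨by omega, lt_min_iff.mpr ⟨by omega, by omega⟩⟩, by
            rw [show w - 1 + 1 = w by ring]; exact hwS⟩
      · refine Or.inl (Or.inr ⟨v-1, ⟨max_le_iff.mpr ⟨by omega, by omega⟩, by omega⟩, by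
          rw [show v - 1 + 1 = v by ring]; exact hvS⟩)
    · exact Or.inl (Or.inl (heq ▸ hvS))
    · refine Or.inr ⟨v-1, ⟨by omega, lt_min_iff.mpr ⟨by omega, by omega⟩⟩, by
        rw [show v - 1 + 1 = v by ring]; exact hvS⟩

-- one step of A's loop, with the three seat tests combined into one condition
theorem pvALoop_step (N K : Int) (S : List Int) (fuel : Nat) (i c : Int) (acc : List Int)
    (hiN : i < N) :
    pvALoop N K S (fuel+1) i c acc
      = if (S.contains (i+1)
            || ((PySem.List.pyRange (max 1 (i-K)) i 1).any (fun j => S.contains (j+1)))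
            || ((PySem.List.pyRange (i+1) (min (N+1) (i+K+1)) 1).any (fun j => S.contains (j+1))))
        then pvALoop N K S fuel (i+1) c acc
        else pvALoop N K S fuel (i+K+1) (c+1) (acc ++ [i+1]) := by
  simp only [pvALoop, if_pos hiN]
  cases h1 : S.contains (i+1) <;>
    cases h2 : ((PySem.List.pyRange (max 1 (i-K)) i 1).any (fun j => S.contains (j+1))) <;>
    cases h3 : ((PySem.List.pyRange (i+1) (min (N+1) (i+K+1)) 1).any (fun j => S.contains (j+1))) <;>
    simp [h1, h2, h3]

theorem pvALoop_end (N K : Int) (S : List Int) (fuel : Nat) (i c : Int) (acc : List Int)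
    (hiN : ¬ i < N) :
    pvALoop N K S (fuel+1) i c acc = (c, acc) := by
  simp only [pvALoop, if_neg hiN]

-- both loops stay in lock-step (B's cursor is A's i + 1)
theorem pvLoop_equiv (N K : Int) (S : List Int)
    (hK : 0 ≤ K) (hNS : (N+1) ∉ S) (hD : ¬ D_getMaxAdditionalDinersCount1 N K 0 S) :
    ∀ (fuel : Nat) (i c : Int) (acc : List Int), 0 ≤ i →
      pvALoop N K S fuel i c acc
        = pvBLoop (if 0 < N then N else 0) K
            (pvBBlocked (if 0 < N then N else 0) (pvBDiff (if 0 < N then N else 0) K S))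
            fuel (i+1) c acc := by
  intro fuel
  induction fuel with
  | zero => intro i c acc _; rfl
  | succ fuel ih =>
    intro i c acc hi
    by_cases hiN : i < N
    · have hn : (if 0 < N then N else 0) = N := if_pos (by omega)
      simp only [hn] at ih ⊢
      rw [pvALoop_step N K S fuel i c acc hiN]
      simp only [pvBLoop]
      rw [if_pos (show i+1 ≤ N by omega)]
      by_cases hblk : pvBlk N K S (i+1)
      · rw [if_pos ((pvCond_equiv N K S i hK hNS hD hi hiN).mpr hblk),
            if_pos ((pvBBlocked_getD N K S (i+1) hK (by omega) (by omega)).mpr hblk)]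
        exact ih (i+1) c acc (by omega)
      · rw [if_neg (fun hc => hblk ((pvCond_equiv N K S i hK hNS hD hi hiN).mp hc)),
            if_neg (fun hc => hblk ((pvBBlocked_getD N K S (i+1) hK (by omega) (by omega)).mp hc))]
        rw [show i+1+K+1 = (i+K+1)+1 by ring]
        exact ih (i+K+1) (c+1) (acc ++ [i+1]) (by omega)
    · rw [pvALoop_end N K S fuel i c acc hiN]
      simp only [pvBLoop]
      rw [if_neg (by split_ifs <;> omega)]

-- D_ does not mention M
theorem pvD_irrel_M (N K M M' : Int) (S : List Int) :
    D_getMaxAdditionalDinersCount1 N K M S ↔ D_getMaxAdditionalDinersCount1 N K M' S := by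
  unfold D_getMaxAdditionalDinersCount1; tauto

-- A's result list extends the accumulator
theorem pvALoop_acc (N K : Int) (S : List Int) :
    ∀ (fuel : Nat) (i c : Int) (acc : List Int),
      ∃ t, (pvALoop N K S fuel i c acc).2 = acc ++ t := by
  intro fuel
  induction fuel with
  | zero => intro i c acc; exact ⟨[], by simp [pvALoop]⟩
  | succ fuel ih =>
    intro i c acc
    by_cases hiN : i < N
    · rw [pvALoop_step N K S fuel i c acc hiN]
      split_ifs with h
      · exact ih (i+1) c acc
      · obtain ⟨t, ht⟩ := ih (i+K+1) (c+1) (acc ++ [i+1])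
        exact ⟨[i+1] ++ t, by rw [ht, List.append_assoc]⟩
    · exact ⟨[], by rw [pvALoop_end N K S fuel i c acc hiN]; simp⟩

-- every element of B's result list was in the accumulator or is unblocked
theorem pvBLoop_mem (n K : Int) (blocked : List Bool) :
    ∀ (fuel : Nat) (p c : Int) (acc : List Int) (x : Int),
      x ∈ (pvBLoop n K blocked fuel p c acc).2 →
      x ∈ acc ∨ blocked.getD (x-1).toNat false = false := by
  intro fuel
  induction fuel with
  | zero => intro p c acc x hx; exact Or.inl hx
  | succ fuel ih =>
    intro p c acc x hx
    simp only [pvBLoop] at hx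
    by_cases hpn : p ≤ n
    · rw [if_pos hpn] at hx
      by_cases hb : blocked.getD (p-1).toNat false = true
      · rw [if_pos hb] at hx
        exact ih (p+1) c acc x hx
      · rw [if_neg hb] at hx
        rcases ih (p+K+1) (c+1) (acc ++ [p]) x hx with h | h
        · rcases List.mem_append.mp h with h' | h'
          · exact Or.inl h'
          · have hxp : x = p := by simpa using h'
            subst hxp
            exact Or.inr (Bool.eq_false_iff.mpr hb)
        · exact Or.inr h
    · rw [if_neg hpn] at hx
      exact Or.inl hx

-- ===== VERDICT (by name: the statement is the Claim_ definition above) =====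
theorem getMaxAdditionalDinersCount1_spec : Claim_unchanged_getMaxAdditionalDinersCount1 := by
  intro N K M S _hDom hPre hD
  obtain ⟨hK, hNS⟩ := hPre
  have hD0 : ¬ D_getMaxAdditionalDinersCount1 N K 0 S :=
    fun h => hD ((pvD_irrel_M N K 0 M S).mp h)
  show getMaxAdditionalDinersCount1 N K M S = getMaxAdditionalDinersCount1_alt N K M S
  unfold getMaxAdditionalDinersCount1 getMaxAdditionalDinersCount1_alt
  have hfuel : (if 0 < N then N else 0).toNat = N.toNat := by split_ifs <;> omega
  dsimp only
  rw [hfuel]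
  have h := pvLoop_equiv N K S hK hNS hD0 (N.toNat + 1) 0 0 [] le_rfl
  rw [show (0:Int)+1 = 1 from rfl] at h
  exact h

theorem getMaxAdditionalDinersCount1_changed : Claim_changed_getMaxAdditionalDinersCount1 := by
  unfold Claim_changed_getMaxAdditionalDinersCount1; decide

theorem getMaxAdditionalDinersCount1_tight : Claim_exact_getMaxAdditionalDinersCount1 := by
  intro N K M S _hDom hPre hD hEq
  obtain ⟨hK, hNS⟩ := hPre
  obtain ⟨h1S, hK1, hN2, hDall⟩ := hD
  -- A's loop first skips occupied seat 1 and then places a diner on seat 2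
  obtain ⟨m, hm⟩ : ∃ m, N.toNat = m + 2 := ⟨N.toNat - 2, by omega⟩
  have hb0 : S.contains ((0:Int)+1) = true := by
    simp only [List.contains_eq_mem, decide_eq_true_eq]
    rw [show ((0:Int)+1) = 1 by norm_num]
    exact h1S
  have hb1 : S.contains ((0:Int)+1+1) = false := by
    simp only [List.contains_eq_mem, decide_eq_false_iff_not]
    rw [show ((0:Int)+1+1) = 2 by norm_num]
    intro hc
    exact hDall 2 hc ⟨le_rfl, le_min (by omega) (by omega)⟩
  have hb2 : ((PySem.List.pyRange (max 1 ((0:Int)+1-K)) ((0:Int)+1) 1).any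
      (fun j => S.contains (j+1))) = false := by
    rw [List.any_eq_false]
    intro j hj
    rw [PySem.List.mem_pyRange_one] at hj
    have h1j : (1:Int) ≤ j := le_trans (le_max_left _ _) hj.1
    have h2j : j < (0:Int)+1 := hj.2
    exact absurd rfl (by omega : ¬ (j = j))
  have hb3 : ((PySem.List.pyRange ((0:Int)+1+1) (min (N+1) ((0:Int)+1+K+1)) 1).any
      (fun j => S.contains (j+1))) = false := by
    rw [List.any_eq_false]
    intro j hj
    rw [PySem.List.mem_pyRange_one] at hj
    have hja : (0:Int)+1+1 ≤ j := hj.1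
    have hjN : j < N+1 := lt_of_lt_of_le hj.2 (min_le_left _ _)
    have hjK : j < (0:Int)+1+K+1 := lt_of_lt_of_le hj.2 (min_le_right _ _)
    simp only [List.contains_eq_mem, decide_eq_true_eq]
    intro hmem
    exact hDall (j+1) hmem ⟨by omega, le_min (by omega) (by omega)⟩
  have hA : getMaxAdditionalDinersCount1 N K M S
      = pvALoop N K S (m+1) ((0:Int)+1+K+1) (0+1) ([] ++ [(0:Int)+1+1]) := by
    unfold getMaxAdditionalDinersCount1
    rw [hm, show m + 2 + 1 = (m+1)+1+1 by ring]
    rw [pvALoop_step N K S ((m+1)+1) 0 0 [] (by omega)]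
    rw [if_pos (by rw [hb0]; rfl)]
    rw [pvALoop_step N K S (m+1) ((0:Int)+1) 0 [] (by omega)]
    rw [if_neg (by rw [hb1, hb2, hb3]; simp)]
  obtain ⟨t, ht⟩ := pvALoop_acc N K S (m+1) ((0:Int)+1+K+1) (0+1) ([] ++ [(0:Int)+1+1])
  have h2A : (2:Int) ∈ (getMaxAdditionalDinersCount1 N K M S).2 := by
    rw [hA, ht]
    refine List.mem_append.mpr (Or.inl ?_)
    norm_num
  have h2B : (2:Int) ∈ (getMaxAdditionalDinersCount1_alt N K M S).2 := by
    rw [← hEq]; exact h2A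
  unfold getMaxAdditionalDinersCount1_alt at h2B
  dsimp only at h2B
  have hn : (if 0 < N then N else 0) = N := if_pos (by omega)
  rw [hn] at h2B
  rcases pvBLoop_mem N K (pvBBlocked N (pvBDiff N K S)) (N.toNat + 1) 1 0 [] 2 h2B with h | h
  · simp at h
  · have hblk : pvBlk N K S 2 := ⟨1, h1S, le_rfl, by omega, by omega, by omega⟩
    have htrue := (pvBBlocked_getD N K S 2 hK (by norm_num) (by omega)).mpr hblk
    rw [h] at htrue
    exact Bool.false_ne_true htrue
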